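-- pv_equiv track=rewrite | github.com/Elbitty/Elbitty | analysis - deprecated.py | cut_to_item
-- ===== SOURCE A (Python) =====
-- def cut_to_item(keywords, tags):
--     if len(tags) > 1:
--         for val in keywords:
--             if val in tags:
--                 tags = tags[0:tags.index(val)]
--     else:
--         pass
--     return tags
-- ===== SOURCE B (Python) =====
-- def cut_to_item(keywords, tags):
--     if len(tags) > 1:
--         for i, t in enumerate(tags):
--             if t in keywords:
--                 return tags[:i]
--     return tags
-- ===== Notes on version B (the rewrite author's own statement) =====
-- stated objective: simpler
-- what changed: Replaces the keyword-driven loop of repeated membership tests and .index scans with re-truncation by a single pass over tags that returns tags[:i] at the first tag found in keywords.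
import Mathlib
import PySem

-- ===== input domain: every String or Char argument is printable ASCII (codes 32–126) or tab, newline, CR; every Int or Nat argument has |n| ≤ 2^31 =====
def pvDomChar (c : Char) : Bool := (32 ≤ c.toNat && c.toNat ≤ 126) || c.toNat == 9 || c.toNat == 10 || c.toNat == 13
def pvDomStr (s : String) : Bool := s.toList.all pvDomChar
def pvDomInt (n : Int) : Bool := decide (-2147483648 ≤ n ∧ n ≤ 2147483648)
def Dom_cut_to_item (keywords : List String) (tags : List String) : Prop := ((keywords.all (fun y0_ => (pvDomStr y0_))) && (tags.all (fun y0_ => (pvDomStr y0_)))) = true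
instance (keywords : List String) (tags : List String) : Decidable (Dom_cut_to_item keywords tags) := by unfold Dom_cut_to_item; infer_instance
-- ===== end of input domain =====

-- B replaces A's keyword-driven repeated truncations with one pass over tags cut at the first keyword tag (simpler).


-- ===== PORT A =====
-- one iteration of A's `for val in keywords` body: `if val in tags: tags = tags[0:tags.index(val)]`
-- (getD 0 is only reached when `val in tags`, so index? is `some` there)
def cutStepA (tags : List String) (val : String) : List String :=
  if tags.contains val then
    PySem.List.slice tags (some 0) (some (((PySem.List.index? tags val).getD 0 : Nat) : Int))
  else tags

def cut_to_item (keywords : List String) (tags : List String) : List String :=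
  if tags.length > 1 then
    keywords.foldl cutStepA tags
  else tags

-- ===== PORT B =====
-- B's `for i, t in enumerate(tags): if t in keywords: return tags[:i]` — the untaken prefix is rebuilt element by element
def cutGoB (keywords : List String) : List String → List String
  | [] => []
  | t :: rest => if keywords.contains t then [] else t :: cutGoB keywords rest

def cut_to_item_alt (keywords : List String) (tags : List String) : List String :=
  if tags.length > 1 then
    cutGoB keywords tags
  else tags

-- ===== PRECONDITION & SPEC =====
def Spec_cut_to_item (keywords : List String) (tags : List String) (out : List String) : Prop := out = cut_to_item_alt keywords tags
instance (keywords : List String) (tags : List String) (out : List String) : Decidable (Spec_cut_to_item keywords tags out) := by unfold Spec_cut_to_item; infer_instance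

-- ===== CLAIM (what is proved, stated in full; the proofs are below) =====
def Claim_equal_cut_to_item : Prop := ∀ (keywords : List String) (tags : List String), Dom_cut_to_item keywords tags → Spec_cut_to_item keywords tags (cut_to_item keywords tags)

-- ===== LEMMAS AND PROOFS =====

-- A's step is a `take` at the first index of val
lemma cutStepA_eq_take (tags : List String) (val : String) :
    cutStepA tags val =
      if val ∈ tags then tags.take ((PySem.List.index? tags val).getD 0) else tags := by
  unfold cutStepA
  by_cases h : val ∈ tags
  · simp [h, PySem.List.slice_zero_start, PySem.List.slice_to_natCast]
  · simp [h]

-- truncating at the earliest of (v :: kws) = truncate at v first, then at kws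
lemma cutGoB_cons (v : String) (kws : List String) (tags : List String) :
    cutGoB (v :: kws) tags = cutGoB kws (cutStepA tags v) := by
  induction tags with
  | nil => simp [cutGoB, cutStepA]
  | cons t rest ih =>
    rw [cutStepA_eq_take]
    have hB : cutGoB (v :: kws) (t :: rest)
        = if t ∈ v :: kws then [] else t :: cutGoB (v :: kws) rest := by
      simp [cutGoB]
    by_cases htv : t = v
    · subst htv
      have hidx : PySem.List.index? (t :: rest) t = some 0 := PySem.List.index?_cons_self t rest
      rw [if_pos (List.mem_cons_self), hidx]
      simp [cutGoB]
    · rw [hB]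
      by_cases hvr : v ∈ rest
      · have hmem : v ∈ t :: rest := List.mem_cons_of_mem _ hvr
        obtain ⟨i, hi⟩ := Option.isSome_iff_exists.mp
          ((PySem.List.index?_isSome_iff rest v).mpr hvr)
        have hidx : PySem.List.index? (t :: rest) v = some (i + 1) := by
          rw [PySem.List.index?_cons_of_ne rest htv, hi]; rfl
        rw [if_pos hmem, hidx]
        simp only [Option.getD_some, List.take_succ_cons]
        have hC : cutGoB kws (t :: rest.take i)
            = if t ∈ kws then [] else t :: cutGoB kws (rest.take i) := by
          simp [cutGoB]
        rw [hC]
        by_cases hk : t ∈ kws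
        · simp [hk, htv]
        · simp only [List.mem_cons, htv, hk, or_self, if_false]
          congr 1
          rw [ih, cutStepA_eq_take, if_pos hvr, hi]; rfl
      · have hnm : v ∉ t :: rest := by
          simp only [List.mem_cons]
          exact fun h => h.elim (fun h' => htv h'.symm) hvr
        rw [if_neg hnm]
        have hC : cutGoB kws (t :: rest)
            = if t ∈ kws then [] else t :: cutGoB kws rest := by
          simp [cutGoB]
        rw [hC]
        by_cases hk : t ∈ kws
        · simp [hk, htv]
        · simp only [List.mem_cons, htv, hk, or_self, if_false]
          congr 1
          rw [ih, cutStepA_eq_take, if_neg hvr]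

lemma cutGoB_nil (tags : List String) : cutGoB ([] : List String) tags = tags := by
  induction tags with
  | nil => rfl
  | cons t r ih => simp [cutGoB, ih]

lemma foldl_eq_cutGoB (kws : List String) (tags : List String) :
    kws.foldl cutStepA tags = cutGoB kws tags := by
  induction kws generalizing tags with
  | nil => simp [cutGoB_nil]
  | cons v kws ih => rw [List.foldl_cons, cutGoB_cons, ih]

-- ===== VERDICT (by name: the statement is the Claim_ definition above) =====
theorem cut_to_item_spec : Claim_equal_cut_to_item := by
  intro keywords tags _
  unfold Spec_cut_to_item cut_to_item cut_to_item_alt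
  by_cases h : tags.length > 1
  · simp only [h, if_pos]
    exact foldl_eq_cutGoB keywords tags
  · simp [h]
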